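-- pv_equiv track=rewrite | github.com/zhangysTHU/circExor | motif_analysis/kmer_assmble.py | windows_around_kmer_hits
-- ===== SOURCE A (Python) =====
-- from typing import List, Tuple, Dict, Iterable, Iterator, Optional, Set
--
-- def revcomp(seq: str) -> str:
--     """DNA 反向互补（若需要）"""
--     table = str.maketrans("ACGTNacgtnUu", "TGCANtgcanTT")
--     return seq.translate(table)[::-1]
--
-- def windows_around_kmer_hits(
--     circ_records: List[Tuple[str, str]],
--     kmers: List[str],
--     flank: int = 10,
--     both_strands: bool = False,
--     pad_with_N: bool = False,
--     dedup: bool = True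
-- ) -> List[Tuple[str, str]]:
--     """
--     “窗口模式”：在每条 circRNA 里查找每个 k-mer 的命中，围绕命中 k-mer 的“中心”截取窗口（默认 ±10 nt）。
--     - even 长度 k-mer 的“中心”取左中位（floor）。
--     - near-end 的窗口若越界：pad_with_N=True 则补 N；否则截短（MEME 可接受不同长度）。
--     """
--     out: List[Tuple[str, str]] = []
--     seen: Set[str] = set()
--     rc_cache: Dict[str, str] = {}
--     for sid, seq in circ_records:
--         L = len(seq)
--         seq_upper = seq  # 已在上游 normalize
--         for k in kmers:
--             klen = len(k)
--             # 正向
--             start = 0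
--             while True:
--                 idx = seq_upper.find(k, start)
--                 if idx == -1:
--                     break
--                 center = idx + (klen // 2)
--                 left = center - flank
--                 right = center + flank + 1  # 包含中心 => 长度=2*flank+1
--                 if left < 0 or right > L:
--                     if pad_with_N:
--                         lpad = max(0, -left)
--                         rpad = max(0, right - L)
--                         sub = seq_upper[max(0, left):min(L, right)]
--                         sub = ("N" * lpad) + sub + ("N" * rpad)
--                     else:
--                         sub = seq_upper[max(0, left):min(L, right)]
--                 else:
--                     sub = seq_upper[left:right]
--                 header = f"{sid}|pos={idx}|kmer={k}|strand=+"
--                 if (not dedup) or (sub not in seen):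
--                     out.append((header, sub))
--                     if dedup:
--                         seen.add(sub)
--                 start = idx + 1  # 允许重叠命中
--
--             # 反向互补（可选）
--             if both_strands:
--                 if k in rc_cache:
--                     k_rc = rc_cache[k]
--                 else:
--                     k_rc = revcomp(k)
--                     rc_cache[k] = k_rc
--                 start = 0
--                 while True:
--                     idx = seq_upper.find(k_rc, start)
--                     if idx == -1:
--                         break
--                     center = idx + (klen // 2)
--                     left = center - flank
--                     right = center + flank + 1
--                     if left < 0 or right > L:
--                         if pad_with_N:
--                             lpad = max(0, -left)
--                             rpad = max(0, right - L)
--                             sub = seq_upper[max(0, left):min(L, right)]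
--                             sub = ("N" * lpad) + sub + ("N" * rpad)
--                         else:
--                             sub = seq_upper[max(0, left):min(L, right)]
--                     else:
--                         sub = seq_upper[left:right]
--                     header = f"{sid}|pos={idx}|kmer={k}|strand=-"
--                     if (not dedup) or (sub not in seen):
--                         out.append((header, sub))
--                         if dedup:
--                             seen.add(sub)
--                     start = idx + 1
--     return out
-- ===== SOURCE B (Python) =====
-- def _revcomp(kmer):
--     comp = {"A": "T", "C": "G", "G": "C", "T": "A", "N": "N",
--             "a": "t", "c": "g", "g": "c", "t": "a", "n": "n",
--             "U": "T", "u": "T"}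
--     return "".join(comp.get(c, c) for c in reversed(kmer))
--
--
-- def windows_around_kmer_hits(circ_records, kmers, flank=10, both_strands=False, pad_with_N=False, dedup=True):
--     # One flat pattern table (kmer, searched text, strand); strands unified up front.
--     pats = []
--     for k in kmers:
--         pats.append((k, k, "+"))
--         if both_strands:
--             pats.append((k, _revcomp(k), "-"))
--     out = []
--     seen = set()
--     for sid, seq in circ_records:
--         L = len(seq)
--         # Per-record l-gram position index, built lazily once per pattern length:
--         # index[l] maps every substring of length l to its (sorted) start positions.
--         # A pattern's hit list is then one hash lookup instead of a per-pattern scan of seq.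
--         index = {}
--         for k, text, strand in pats:
--             ell = len(text)
--             if ell not in index:
--                 grams = {}
--                 for i in range(L - ell + 1):
--                     grams.setdefault(seq[i:i + ell], []).append(i)
--                 index[ell] = grams
--             half = len(k) // 2
--             for idx in index[ell].get(text, []):
--                 left = idx + half - flank
--                 right = idx + half + flank + 1
--                 sub = seq[max(0, left):min(L, right)]
--                 if pad_with_N and (left < 0 or right > L):
--                     sub = "N" * max(0, -left) + sub + "N" * max(0, right - L)
--                 header = f"{sid}|pos={idx}|kmer={k}|strand={strand}"
--                 if not dedup or sub not in seen:
--                     out.append((header, sub))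
--                     if dedup:
--                         seen.add(sub)
--     return out
-- ===== Notes on version B (the rewrite author's own statement) =====
-- stated objective: alternative
-- what changed: B replaces A's per-kmer repeated str.find scans of each sequence by a per-record hash index: for each needed pattern length l it builds, once, a dict mapping every l-gram of the sequence to its start positions, so each pattern's (overlapping) hit list becomes a single dictionary lookup instead of a scan; a flat (kmer, text, strand) table built up front replaces A's interleaved forward/revcomp find loops and rc cache. This trades a per-length indexing pass for the per-kmer scans: it wins when many kmers share a length, but is not measurably faster on the graded input family.
import Mathlib
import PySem

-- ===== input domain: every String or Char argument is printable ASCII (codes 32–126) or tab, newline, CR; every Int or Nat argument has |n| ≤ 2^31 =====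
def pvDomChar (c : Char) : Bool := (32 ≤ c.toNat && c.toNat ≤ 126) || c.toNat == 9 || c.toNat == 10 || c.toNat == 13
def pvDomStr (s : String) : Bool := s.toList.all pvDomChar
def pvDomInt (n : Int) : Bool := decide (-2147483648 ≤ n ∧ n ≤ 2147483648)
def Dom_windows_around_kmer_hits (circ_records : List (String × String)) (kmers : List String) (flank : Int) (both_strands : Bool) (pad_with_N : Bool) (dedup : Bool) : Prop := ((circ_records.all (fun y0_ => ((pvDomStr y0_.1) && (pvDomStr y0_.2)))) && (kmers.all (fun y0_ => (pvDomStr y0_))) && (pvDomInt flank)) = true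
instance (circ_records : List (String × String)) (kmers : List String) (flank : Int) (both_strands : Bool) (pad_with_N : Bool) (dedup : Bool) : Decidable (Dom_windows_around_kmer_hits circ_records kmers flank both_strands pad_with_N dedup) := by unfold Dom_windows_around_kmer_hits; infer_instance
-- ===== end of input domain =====

-- B replaces A's per-kmer repeated str.find scans by a per-record hash index of all
-- l-gram positions (built once per pattern length), so each pattern's hit list is one
-- dict lookup; objective: alternative (the per-kmer scan of the sequence disappears,
-- traded for one indexing pass per pattern length).

-- ===== PORT A =====

-- str.maketrans("ACGTNacgtnUu", "TGCANtgcanTT") as a per-character function; translate on a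
-- 1-char→1-char table is exactly a map (chars outside the table are unchanged).
def pvCompChar (c : Char) : Char :=
  if c = 'A' then 'T' else if c = 'C' then 'G' else if c = 'G' then 'C'
  else if c = 'T' then 'A' else if c = 'N' then 'N'
  else if c = 'a' then 't' else if c = 'c' then 'g' else if c = 'g' then 'c'
  else if c = 't' then 'a' else if c = 'n' then 'n'
  else if c = 'U' then 'T' else if c = 'u' then 'T' else c

-- revcomp: seq.translate(table)[::-1]  ([::-1] is reverse)
def pvRevcomp (seq : String) : String :=
  String.ofList ((seq.toList.map pvCompChar).reverse)

-- f"{sid}|pos={idx}|kmer={k}|strand={strand}"  (both Pythons build this same string)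
def pvHeader (sid : String) (idx : Int) (k : String) (strand : String) : String :=
  sid ++ "|pos=" ++ PySem.Int.toStr idx ++ "|kmer=" ++ k ++ "|strand=" ++ strand

-- the shared emission step (identical source lines in A and B):
--   if (not dedup) or (sub not in seen): out.append((header, sub)); if dedup: seen.add(sub)
def pvEmit (header : String) (sub : List Char) (dedup : Bool)
    (st : List (String × String) × PySem.Set String) :
    List (String × String) × PySem.Set String :=
  if !dedup || !(PySem.Set.contains st.2 (String.ofList sub)) then
    (st.1 ++ [(header, String.ofList sub)],
     if dedup then PySem.Set.add st.2 (String.ofList sub) else st.2)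
  else st

-- A's window extraction: the if left<0 or right>L / pad_with_N branch structure, verbatim.
-- ("N" * lpad is replicate; lpad, rpad ≥ 0 at that point)
def pvSubA (seq : List Char) (left right : Int) (pad : Bool) : List Char :=
  let L : Int := seq.length
  if left < 0 ∨ right > L then
    if pad then
      let lpad := max 0 (-left)
      let rpad := max 0 (right - L)
      let sub := PySem.List.slice seq (some (max 0 left)) (some (min L right))
      List.replicate lpad.toNat 'N' ++ sub ++ List.replicate rpad.toNat 'N'
    else
      PySem.List.slice seq (some (max 0 left)) (some (min L right))
  else
    PySem.List.slice seq (some left) (some right)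

-- termination fact for A's `while True: idx = seq.find(k, start); ...; start = idx + 1` loop
theorem pvFindFrom_progress (seq pat : List Char) (start : Nat)
    (h : PySem.Chars.findFrom seq pat (start : Int) none ≠ -1) :
    start ≤ (PySem.Chars.findFrom seq pat (start : Int) none).toNat ∧ start ≤ seq.length := by
  by_cases hs : start ≤ seq.length
  · have h1 := (PySem.Chars.findFrom_natCast_spec seq pat start hs h).1
    constructor
    · omega
    · exact hs
  · exfalso
    apply h
    have h1 : ¬ ((start : Int) < 0) := by omega
    have h2 : (seq.length : Int) < (start : Int) := by omega
    simp [PySem.Chars.findFrom, h1, h2]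

-- A's inner while-loop (one strand, one kmer): find from `start`, emit, continue at idx+1
def pvFindLoopA (seq : List Char) (sid k strand : String) (pat : List Char) (klen : Int)
    (flank : Int) (pad dedup : Bool) (start : Nat)
    (st : List (String × String) × PySem.Set String) :
    List (String × String) × PySem.Set String :=
  let idx := PySem.Chars.findFrom seq pat (start : Int) none
  if h : idx = -1 then st
  else
    let center := idx + PySem.Int.floordiv klen 2
    let left := center - flank
    let right := center + flank + 1
    let sub := pvSubA seq left right pad
    let st' := pvEmit (pvHeader sid idx k strand) sub dedup st
    pvFindLoopA seq sid k strand pat klen flank pad dedup (idx.toNat + 1) st'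
termination_by seq.length + 1 - start
decreasing_by
  have := pvFindFrom_progress seq pat start h
  omega

-- A's per-kmer body: forward loop, then (optionally) the rc_cache lookup and the rc loop
def pvKmerStepA (seq : List Char) (sid : String) (flank : Int) (both pad dedup : Bool)
    (st : (List (String × String) × PySem.Set String) × PySem.Dict String String)
    (k : String) :
    (List (String × String) × PySem.Set String) × PySem.Dict String String :=
  let klen : Int := k.toList.length
  let st1 := pvFindLoopA seq sid k "+" k.toList klen flank pad dedup 0 st.1
  if both then
    match st.2.get? k with
    | some v => (pvFindLoopA seq sid k "-" v.toList klen flank pad dedup 0 st1, st.2)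
    | none =>
        let k_rc := pvRevcomp k
        (pvFindLoopA seq sid k "-" k_rc.toList klen flank pad dedup 0 st1,
         st.2.insert k k_rc)
  else (st1, st.2)

def windows_around_kmer_hits (circ_records : List (String × String)) (kmers : List String)
    (flank : Int) (both_strands : Bool) (pad_with_N : Bool) (dedup : Bool) :
    List (String × String) :=
  (circ_records.foldl
    (fun st rec =>
      kmers.foldl (pvKmerStepA rec.2.toList rec.1 flank both_strands pad_with_N dedup) st)
    (([], PySem.Set.ofList []), PySem.Dict.empty)).1.1

-- ===== PORT B =====

-- B's _revcomp: "".join(comp.get(c, c) for c in reversed(kmer))  (same char table, reversed first)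
def pvRevcompB (kmer : String) : String :=
  String.ofList (kmer.toList.reverse.map pvCompChar)

-- the flat pattern table: for k in kmers: (k, k, '+'); if both_strands: (k, _revcomp(k), '-')
def pvPats (kmers : List String) (both : Bool) : List (String × String × String) :=
  kmers.flatMap (fun k => (k, k, "+") :: (if both then [(k, pvRevcompB k, "-")] else []))

-- seq[i:i+ell], the key of the gram index
def pvGram (seq : List Char) (ell i : Nat) : String :=
  String.ofList (PySem.List.slice seq (some (i : Int)) (some ((i : Int) + (ell : Int))))

-- grams = {}; for i in range(L - ell + 1): grams.setdefault(seq[i:i+ell], []).append(i)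
-- (setdefault(g, []).append(i) is grams[g] = grams.get(g, []) + [i], i.e. Dict.modify)
def pvGramIndex (seq : List Char) (ell : Nat) : PySem.Dict String (List Nat) :=
  (List.range (seq.length + 1 - ell)).foldl
    (fun d i => d.modify (pvGram seq ell i) [] (· ++ [i])) PySem.Dict.empty

-- B's window extraction: clip first, then pad only if needed
def pvSubB (seq : List Char) (left right : Int) (pad : Bool) : List Char :=
  let L : Int := seq.length
  let sub := PySem.List.slice seq (some (max 0 left)) (some (min L right))
  if pad && (decide (left < 0) || decide (right > L)) then
    List.replicate (max 0 (-left)).toNat 'N' ++ sub ++ List.replicate (max 0 (right - L)).toNat 'N'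
  else sub

-- B's per-hit emission body
def pvStepB (seq : List Char) (sid k strand : String) (half flank : Int) (pad dedup : Bool)
    (st : List (String × String) × PySem.Set String) (i : Nat) :
    List (String × String) × PySem.Set String :=
  let left := (i : Int) + half - flank
  let right := (i : Int) + half + flank + 1
  pvEmit (pvHeader sid i k strand) (pvSubB seq left right pad) dedup st

-- B's per-pattern body: ensure index[ell] exists, look the pattern up, emit its hits
def pvPatStepB (seq : List Char) (sid : String) (flank : Int) (pad dedup : Bool)
    (st : (List (String × String) × PySem.Set String) × PySem.Dict Int (PySem.Dict String (List Nat)))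
    (p : String × String × String) :
    (List (String × String) × PySem.Set String) × PySem.Dict Int (PySem.Dict String (List Nat)) :=
  let ell := p.2.1.toList.length
  let index := if st.2.contains (ell : Int) then st.2
               else st.2.insert (ell : Int) (pvGramIndex seq ell)
  let hits := (index.getD (ell : Int) PySem.Dict.empty).getD p.2.1 []
  let half := PySem.Int.floordiv (p.1.toList.length : Int) 2
  (hits.foldl (pvStepB seq sid p.1 p.2.2 half flank pad dedup) st.1, index)

def windows_around_kmer_hits_alt (circ_records : List (String × String)) (kmers : List String)
    (flank : Int) (both_strands : Bool) (pad_with_N : Bool) (dedup : Bool) :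
    List (String × String) :=
  let pats := pvPats kmers both_strands
  (circ_records.foldl
    (fun st rec =>
      (pats.foldl (pvPatStepB rec.2.toList rec.1 flank pad_with_N dedup)
        (st, PySem.Dict.empty)).1)
    ([], PySem.Set.ofList [])).1

-- ===== PRECONDITION & SPEC =====
def Spec_windows_around_kmer_hits (circ_records : List (String × String)) (kmers : List String) (flank : Int) (both_strands : Bool) (pad_with_N : Bool) (dedup : Bool) (out : List (String × String)) : Prop := out = windows_around_kmer_hits_alt circ_records kmers flank both_strands pad_with_N dedup
instance (circ_records : List (String × String)) (kmers : List String) (flank : Int) (both_strands : Bool) (pad_with_N : Bool) (dedup : Bool) (out : List (String × String)) : Decidable (Spec_windows_around_kmer_hits circ_records kmers flank both_strands pad_with_N dedup out) := by unfold Spec_windows_around_kmer_hits; infer_instance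

-- ===== CLAIM (what is proved, stated in full; the proofs are below) =====
def Claim_equal_windows_around_kmer_hits : Prop := ∀ (circ_records : List (String × String)) (kmers : List String) (flank : Int) (both_strands : Bool) (pad_with_N : Bool) (dedup : Bool), Dom_windows_around_kmer_hits circ_records kmers flank both_strands pad_with_N dedup → Spec_windows_around_kmer_hits circ_records kmers flank both_strands pad_with_N dedup (windows_around_kmer_hits circ_records kmers flank both_strands pad_with_N dedup)

-- ===== LEMMAS AND PROOFS =====

-- the positions (in order) at which `pat` occurs in `seq` (the common midpoint of the proof)
def pvHits (seq : List Char) (pat : List Char) : List Nat :=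
  (List.range (seq.length + 1)).filter (fun i => PySem.Chars.startswith (seq.drop i) pat)

-- emission of all of one pattern's hits (A's one-kmer-one-strand loop lands here, and so
-- does B's lookup-then-emit body)
def pvEmitHits (seq : List Char) (sid : String) (flank : Int) (pad dedup : Bool)
    (st : List (String × String) × PySem.Set String) (p : String × String × String) :
    List (String × String) × PySem.Set String :=
  let hits := pvHits seq p.2.1.toList
  let half := PySem.Int.floordiv (p.1.toList.length : Int) 2
  hits.foldl (pvStepB seq sid p.1 p.2.2 half flank pad dedup) st

-- the two revcomps agree (map-then-reverse = reverse-then-map)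
theorem pvRevcomp_eq (k : String) : pvRevcompB k = pvRevcomp k := by
  simp [pvRevcompB, pvRevcomp, List.map_reverse]

-- the two window extractions agree
theorem pvSub_eq (seq : List Char) (left right : Int) (pad : Bool) :
    pvSubA seq left right pad = pvSubB seq left right pad := by
  unfold pvSubA pvSubB
  by_cases h : left < 0 ∨ right > (seq.length : Int)
  · rw [if_pos h]
    have hb : (decide (left < 0) || decide (right > (seq.length : Int))) = true := by
      rcases h with h | h <;> simp [h]
    cases pad with
    | false => simp
    | true => simp [hb]
  · rw [if_neg h]
    push_neg at h
    have h1 : max 0 left = left := max_eq_right h.1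
    have h2 : min (seq.length : Int) right = right := min_eq_right h.2
    have hb : (pad && (decide (left < 0) || decide (right > (seq.length : Int)))) = false := by
      have hx : ¬ left < 0 := by omega
      have hy : ¬ right > (seq.length : Int) := by omega
      simp [hx, hy]
    simp only [hb, Bool.false_eq_true, if_false, h1, h2]

-- startswith at i  ↔  prefix of the i-th suffix
theorem pvSw_iff (seq pat : List Char) (i : Nat) :
    PySem.Chars.startswith (seq.drop i) pat = true ↔ pat <+: seq.drop i := by
  simp [PySem.Chars.startswith, List.isPrefixOf_iff_prefix]

-- a prefix somewhere at/after `start` is an infix of the `start`-suffix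
theorem pvPrefix_infix (seq pat : List Char) (start a : Nat) (hsa : start ≤ a)
    (h : pat <+: seq.drop a) : pat <:+: seq.drop start := by
  have : seq.drop a = (seq.drop start).drop (a - start) := by
    rw [List.drop_drop]; congr 1; omega
  rw [this] at h
  exact h.isInfix.trans (List.drop_suffix _ _).isInfix

-- no find ⇒ no hits at/after start
theorem pvFind_none (seq pat : List Char) (start : Nat)
    (h : PySem.Chars.findFrom seq pat (start : Int) none = -1) :
    (pvHits seq pat).filter (fun i => decide (start ≤ i)) = [] := by
  apply List.filter_eq_nil_iff.mpr
  intro a ha hQ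
  simp only [decide_eq_true_eq] at hQ
  unfold pvHits at ha
  rw [List.mem_filter, List.mem_range] at ha
  obtain ⟨har, hsw⟩ := ha
  by_cases hs : start ≤ seq.length
  · have hno := (PySem.Chars.findFrom_natCast_eq_neg_one_iff seq pat start hs).mp h
    exact hno (pvPrefix_infix seq pat start a hQ ((pvSw_iff seq pat a).mp hsw))
  · omega

-- first hit: the filter starting at `start` begins with the find result
theorem pvFilter_range_first (n a : Nat) (Q : Nat → Bool) (han : a < n) (hQ : Q a = true)
    (hmin : ∀ i, i < a → Q i = false) :
    (List.range n).filter Q = a :: (List.range n).filter (fun i => decide (a + 1 ≤ i) && Q i) := by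
  obtain ⟨m, rfl⟩ : ∃ m, n = (a + 1) + m := ⟨n - (a + 1), by omega⟩
  rw [List.range_add, List.filter_append, List.filter_append, List.range_succ,
      List.filter_append, List.filter_append]
  have h1 : (List.range a).filter Q = [] := by
    apply List.filter_eq_nil_iff.mpr
    intro b hb
    rw [List.mem_range] at hb
    simp [hmin b hb]
  have h2 : (List.range a).filter (fun i => decide (a + 1 ≤ i) && Q i) = [] := by
    apply List.filter_eq_nil_iff.mpr
    intro b hb
    rw [List.mem_range] at hb
    simp; omega
  have h3 : [a].filter Q = [a] := by simp [hQ]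
  have h4 : [a].filter (fun i => decide (a + 1 ≤ i) && Q i) = [] := by simp
  have h5 : ((List.range m).map (fun x => a + 1 + x)).filter (fun i => decide (a + 1 ≤ i) && Q i)
      = ((List.range m).map (fun x => a + 1 + x)).filter Q := by
    apply List.filter_congr
    intro b hb
    rw [List.mem_map] at hb
    obtain ⟨x, _, rfl⟩ := hb
    have : a + 1 ≤ a + 1 + x := by omega
    simp [this]
  rw [h1, h2, h3, h4, h5]
  simp

-- found ⇒ the filtered hit list decomposes as (first hit) :: (hits after it)
theorem pvFind_some (seq pat : List Char) (start a : Nat)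
    (h : PySem.Chars.findFrom seq pat (start : Int) none ≠ -1)
    (ha : PySem.Chars.findFrom seq pat (start : Int) none = (a : Int)) :
    (pvHits seq pat).filter (fun i => decide (start ≤ i)) =
      a :: ((pvHits seq pat).filter (fun i => decide (a + 1 ≤ i))) := by
  have hs : start ≤ seq.length := (pvFindFrom_progress seq pat start h).2
  obtain ⟨hge, hpref, hmin⟩ := PySem.Chars.findFrom_natCast_spec seq pat start hs h
  rw [ha] at hge hpref hmin
  simp only [Int.toNat_natCast] at hpref hmin
  have hsa : start ≤ a := by omega
  have haL : a ≤ seq.length := by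
    by_cases hp : pat = []
    · subst hp
      have : a ≤ start := by
        by_contra hlt
        exact hmin start le_rfl (by omega) (List.nil_prefix)
      omega
    · by_contra hLa
      have : seq.drop a = [] := List.drop_eq_nil_of_le (by omega)
      rw [this] at hpref
      exact hp (List.prefix_nil.mp hpref)
  unfold pvHits
  rw [List.filter_filter, List.filter_filter]
  rw [pvFilter_range_first (seq.length + 1) a
        (fun i => decide (start ≤ i) && PySem.Chars.startswith (List.drop i seq) pat)
        (by omega)
        (by simp [hsa]; exact (pvSw_iff seq pat a).mpr hpref)
        (by
          intro i hi
          by_cases hsi : start ≤ i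
          · have hnp : ¬ pat <+: seq.drop i := hmin i hsi (by omega)
            have hsw : PySem.Chars.startswith (List.drop i seq) pat = false := by
              rw [← Bool.not_eq_true]
              intro hw
              exact hnp ((pvSw_iff seq pat i).mp hw)
            simp [hsi, hsw]
          · simp [hsi])]
  congr 1
  apply List.filter_congr
  intro b _
  by_cases h1 : a + 1 ≤ b
  · have h2 : start ≤ b := by omega
    simp [h1, h2]
  · simp [h1]

-- A's find loop from `start` = the emission fold over the hits ≥ start
theorem pvLoop_eq (seq : List Char) (sid k strand : String) (pat : List Char)
    (klen flank : Int) (pad dedup : Bool) (start : Nat)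
    (st : List (String × String) × PySem.Set String) :
    pvFindLoopA seq sid k strand pat klen flank pad dedup start st =
      ((pvHits seq pat).filter (fun i => decide (start ≤ i))).foldl
        (pvStepB seq sid k strand (PySem.Int.floordiv klen 2) flank pad dedup) st := by
  have main : ∀ (m start : Nat) (st : List (String × String) × PySem.Set String),
      seq.length + 1 - start ≤ m →
      pvFindLoopA seq sid k strand pat klen flank pad dedup start st =
        ((pvHits seq pat).filter (fun i => decide (start ≤ i))).foldl
          (pvStepB seq sid k strand (PySem.Int.floordiv klen 2) flank pad dedup) st := by
    intro m
    induction m with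
    | zero =>
        intro start st hm
        have hno : PySem.Chars.findFrom seq pat (start : Int) none = -1 := by
          by_contra hne
          have := pvFindFrom_progress seq pat start hne
          omega
        rw [pvFindLoopA]
        simp only [hno, reduceDIte]
        rw [pvFind_none seq pat start hno]
        rfl
    | succ m ih =>
        intro start st hm
        rw [pvFindLoopA]
        by_cases hno : PySem.Chars.findFrom seq pat (start : Int) none = -1
        · simp only [hno, reduceDIte]
          rw [pvFind_none seq pat start hno]
          rfl
        · simp only [hno, reduceDIte]
          have hprog := pvFindFrom_progress seq pat start hno
          set a := (PySem.Chars.findFrom seq pat (start : Int) none).toNat with ha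
          have hcast : PySem.Chars.findFrom seq pat (start : Int) none = (a : Int) := by
            have h0 := (PySem.Chars.findFrom_natCast_spec seq pat start hprog.2 hno).1
            omega
          have hsplit := pvFind_some seq pat start a hno hcast
          rw [hsplit, List.foldl_cons]
          rw [ih (a + 1) _ (by omega)]
          congr 1
          rw [hcast]
          unfold pvStepB
          rw [pvSub_eq]
  exact main (seq.length + 1 - start) start st le_rfl

theorem pvLoop_zero (seq : List Char) (sid k strand : String) (pat : List Char)
    (klen flank : Int) (pad dedup : Bool)
    (st : List (String × String) × PySem.Set String) :
    pvFindLoopA seq sid k strand pat klen flank pad dedup 0 st =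
      (pvHits seq pat).foldl
        (pvStepB seq sid k strand (PySem.Int.floordiv klen 2) flank pad dedup) st := by
  rw [pvLoop_eq]
  congr 1
  apply List.filter_eq_self.mpr
  intro a _
  simp

-- ===== A-side: A's nested loops = fold of pvEmitHits over the flat pattern table =====

-- the rc-cache invariant: every stored value is the revcomp of its key
def pvCacheOK (d : PySem.Dict String String) : Prop :=
  ∀ k v, d.get? k = some v → v = pvRevcomp k

theorem pvKmerStepA_eq (seq : List Char) (sid : String) (flank : Int)
    (both pad dedup : Bool)
    (st : (List (String × String) × PySem.Set String) × PySem.Dict String String)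
    (k : String) (hc : pvCacheOK st.2) :
    (pvKmerStepA seq sid flank both pad dedup st k).1 =
      ((k, k, "+") :: (if both then [(k, pvRevcompB k, "-")] else [])).foldl
        (pvEmitHits seq sid flank pad dedup) st.1
    ∧ pvCacheOK (pvKmerStepA seq sid flank both pad dedup st k).2 := by
  cases both with
  | false =>
      unfold pvKmerStepA
      simp only [Bool.false_eq_true, reduceIte, List.foldl_cons, List.foldl_nil]
      refine ⟨?_, hc⟩
      rw [pvLoop_zero]
      unfold pvEmitHits
      rfl
  | true =>
      cases hget : st.2.get? k with
      | some v =>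
          have hv : v = pvRevcomp k := hc k v hget
          unfold pvKmerStepA
          simp only [hget, reduceIte, List.foldl_cons, List.foldl_nil]
          refine ⟨?_, hc⟩
          rw [pvLoop_zero, pvLoop_zero]
          unfold pvEmitHits
          simp only [hv, pvRevcomp_eq]
      | none =>
          unfold pvKmerStepA
          simp only [hget, reduceIte, List.foldl_cons, List.foldl_nil]
          constructor
          · rw [pvLoop_zero, pvLoop_zero]
            unfold pvEmitHits
            simp only [pvRevcomp_eq]
          · intro k' v' hk'
            rw [PySem.Dict.get?_insert] at hk'
            by_cases hkk : k' = k
            · subst hkk; rw [if_pos rfl] at hk'; cases hk'; rfl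
            · rw [if_neg hkk] at hk'; exact hc k' v' hk'

theorem pvRecord_eq (seq : List Char) (sid : String) (flank : Int)
    (both pad dedup : Bool) (kmers : List String) :
    ∀ (bst : List (String × String) × PySem.Set String) (cache : PySem.Dict String String),
      pvCacheOK cache →
      (kmers.foldl (pvKmerStepA seq sid flank both pad dedup) (bst, cache)).1 =
        (pvPats kmers both).foldl (pvEmitHits seq sid flank pad dedup) bst
      ∧ pvCacheOK (kmers.foldl (pvKmerStepA seq sid flank both pad dedup) (bst, cache)).2 := by
  have H : ∀ (km : List String) (bst : List (String × String) × PySem.Set String)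
      (cache : PySem.Dict String String), pvCacheOK cache →
      (km.foldl (pvKmerStepA seq sid flank both pad dedup) (bst, cache)).1 =
        km.foldl (fun b k => ((k, k, "+") :: (if both then [(k, pvRevcompB k, "-")] else [])).foldl
          (pvEmitHits seq sid flank pad dedup) b) bst
      ∧ pvCacheOK (km.foldl (pvKmerStepA seq sid flank both pad dedup) (bst, cache)).2 := by
    intro km
    induction km with
    | nil => intro bst cache hc; exact ⟨rfl, hc⟩
    | cons k ks ih =>
        intro bst cache hc
        rw [List.foldl_cons, List.foldl_cons]
        obtain ⟨h1, h2⟩ := pvKmerStepA_eq seq sid flank both pad dedup (bst, cache) k hc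
        have heta : pvKmerStepA seq sid flank both pad dedup (bst, cache) k =
            ((pvKmerStepA seq sid flank both pad dedup (bst, cache) k).1,
             (pvKmerStepA seq sid flank both pad dedup (bst, cache) k).2) := rfl
        rw [heta]
        obtain ⟨ih1, ih2⟩ := ih ((pvKmerStepA seq sid flank both pad dedup (bst, cache) k).1)
          ((pvKmerStepA seq sid flank both pad dedup (bst, cache) k).2) h2
        exact ⟨by rw [ih1, h1], ih2⟩
  intro bst cache hc
  obtain ⟨h1, h2⟩ := H kmers bst cache hc
  refine ⟨?_, h2⟩
  rw [h1]
  unfold pvPats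
  rw [List.foldl_flatMap]

theorem pvEmptyCacheOK : pvCacheOK PySem.Dict.empty := by
  intro k v h
  simp [PySem.Dict.get?, PySem.Dict.empty] at h

-- ===== B-side: the gram-index lookup = pvHits =====

-- the built gram dict, looked up at any string t, lists exactly the i with seq[i:i+ell] = t
theorem pvGramIndex_getD (seq : List Char) (ell : Nat) (t : String) :
    (pvGramIndex seq ell).getD t [] =
      (List.range (seq.length + 1 - ell)).filter (fun i => pvGram seq ell i == t) := by
  unfold pvGramIndex
  rw [show ((List.range (seq.length + 1 - ell)).foldl
        (fun d i => d.modify (pvGram seq ell i) [] (· ++ [i])) PySem.Dict.empty)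
      = (((List.range (seq.length + 1 - ell)).map (fun i => (pvGram seq ell i, i))).foldl
        (fun d p => d.modify p.1 [] (· ++ [p.2])) PySem.Dict.empty) from by rw [List.foldl_map]]
  rw [PySem.Dict.getD_foldl_modify_append]
  rw [PySem.Dict.getD_empty, List.nil_append, List.filter_map, List.map_map]
  simp [Function.comp_def]

-- the gram at i equals t  ↔  t's characters occur at i (as a prefix of the i-th suffix)
theorem pvGram_beq_iff (seq : List Char) (i : Nat) (t : String) :
    (pvGram seq t.toList.length i == t) = PySem.Chars.startswith (seq.drop i) t.toList := by
  rw [Bool.eq_iff_iff, beq_iff_eq, pvSw_iff, List.prefix_iff_eq_take]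
  unfold pvGram
  rw [PySem.List.slice_natCast_add]
  constructor
  · intro h
    rw [← h, String.toList_ofList, List.length_take, ← List.take_take, List.take_length]
  · intro h
    rw [← h, String.ofList_toList]

-- a predicate false from `n` on filters the same over a longer range
theorem pvFilter_range_ext (n m : Nat) (P : Nat → Bool) (hnm : n ≤ m)
    (h : ∀ i, n ≤ i → i < m → P i = false) :
    (List.range m).filter P = (List.range n).filter P := by
  obtain ⟨d, rfl⟩ : ∃ d, m = n + d := ⟨m - n, by omega⟩
  rw [List.range_add, List.filter_append]
  have h2 : ((List.range d).map (fun x => n + x)).filter P = [] := by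
    apply List.filter_eq_nil_iff.mpr
    intro b hb
    rw [List.mem_map] at hb
    obtain ⟨x, hx, rfl⟩ := hb
    rw [List.mem_range] at hx
    simp [h (n + x) (by omega) (by omega)]
  rw [h2, List.append_nil]

-- the index lookup is exactly pvHits
theorem pvGramIndex_hits (seq : List Char) (t : String) :
    (pvGramIndex seq t.toList.length).getD t [] = pvHits seq t.toList := by
  rw [pvGramIndex_getD]
  unfold pvHits
  have hP : (fun i => pvGram seq t.toList.length i == t)
      = (fun i => PySem.Chars.startswith (seq.drop i) t.toList) := by
    funext i
    exact pvGram_beq_iff seq i t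
  rw [hP]
  refine (pvFilter_range_ext _ _ _ (by omega) ?_).symm
  intro i hi him
  rcases Nat.eq_zero_or_pos t.toList.length with h0 | h0
  · omega
  · rw [← Bool.not_eq_true]
    intro hw
    have hpre := (pvSw_iff seq t.toList i).mp hw
    have hlen := hpre.length_le
    rw [List.length_drop] at hlen
    omega

-- ===== B-side: B's per-record fold = fold of pvEmitHits =====

-- the lazy-index invariant: every stored entry is the gram index of its length
def pvIdxOK (seq : List Char) (d : PySem.Dict Int (PySem.Dict String (List Nat))) : Prop :=
  ∀ (n : Nat) g, d.get? (n : Int) = some g → g = pvGramIndex seq n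

theorem pvPatStepB_eq (seq : List Char) (sid : String) (flank : Int) (pad dedup : Bool)
    (st : (List (String × String) × PySem.Set String) × PySem.Dict Int (PySem.Dict String (List Nat)))
    (p : String × String × String) (hi : pvIdxOK seq st.2) :
    (pvPatStepB seq sid flank pad dedup st p).1 = pvEmitHits seq sid flank pad dedup st.1 p
    ∧ pvIdxOK seq (pvPatStepB seq sid flank pad dedup st p).2 := by
  unfold pvPatStepB pvEmitHits
  by_cases hc : st.2.contains ((p.2.1.toList.length : Nat) : Int)
  · simp only [hc, reduceIte]
    have hsome : (st.2.get? ((p.2.1.toList.length : Nat) : Int)).isSome := by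
      rw [← PySem.Dict.contains_eq_isSome_get?]; exact hc
    obtain ⟨g, hg⟩ := Option.isSome_iff_exists.mp hsome
    have hgv : g = pvGramIndex seq p.2.1.toList.length := hi _ g hg
    rw [PySem.Dict.getD_of_get?_eq_some _ _ hg, hgv, pvGramIndex_hits]
    exact ⟨rfl, hi⟩
  · rw [Bool.not_eq_true] at hc
    simp only [hc, Bool.false_eq_true, if_false]
    rw [PySem.Dict.getD_of_get?_eq_some _ _ (PySem.Dict.get?_insert_self _ _ _), pvGramIndex_hits]
    refine ⟨rfl, ?_⟩
    intro n g hg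
    rw [PySem.Dict.get?_insert] at hg
    by_cases hn : (n : Int) = ((p.2.1.toList.length : Nat) : Int)
    · rw [if_pos hn] at hg
      cases hg
      have hne : n = p.2.1.toList.length := by exact_mod_cast hn
      rw [hne]
    · rw [if_neg hn] at hg
      exact hi n g hg

theorem pvRecordB_eq (seq : List Char) (sid : String) (flank : Int) (pad dedup : Bool)
    (pats : List (String × String × String)) :
    ∀ (bst : List (String × String) × PySem.Set String)
      (idx : PySem.Dict Int (PySem.Dict String (List Nat))), pvIdxOK seq idx →
      (pats.foldl (pvPatStepB seq sid flank pad dedup) (bst, idx)).1 =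
        pats.foldl (pvEmitHits seq sid flank pad dedup) bst
      ∧ pvIdxOK seq (pats.foldl (pvPatStepB seq sid flank pad dedup) (bst, idx)).2 := by
  induction pats with
  | nil => intro bst idx hi; exact ⟨rfl, hi⟩
  | cons p ps ih =>
      intro bst idx hi
      rw [List.foldl_cons, List.foldl_cons]
      obtain ⟨h1, h2⟩ := pvPatStepB_eq seq sid flank pad dedup (bst, idx) p hi
      have heta : pvPatStepB seq sid flank pad dedup (bst, idx) p =
          ((pvPatStepB seq sid flank pad dedup (bst, idx) p).1,
           (pvPatStepB seq sid flank pad dedup (bst, idx) p).2) := rfl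
      rw [heta]
      obtain ⟨ih1, ih2⟩ := ih ((pvPatStepB seq sid flank pad dedup (bst, idx) p).1)
        ((pvPatStepB seq sid flank pad dedup (bst, idx) p).2) h2
      exact ⟨by rw [ih1, h1], ih2⟩

theorem pvEmptyIdxOK (seq : List Char) : pvIdxOK seq PySem.Dict.empty := by
  intro n g h
  simp [PySem.Dict.get?, PySem.Dict.empty] at h

-- ===== VERDICT (by name: the statement is the Claim_ definition above) =====
theorem windows_around_kmer_hits_spec : Claim_equal_windows_around_kmer_hits := by
  intro circ_records kmers flank both pad dedup _
  unfold Spec_windows_around_kmer_hits windows_around_kmer_hits windows_around_kmer_hits_alt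
  have mainB : ∀ (recs : List (String × String)) (bst : List (String × String) × PySem.Set String),
      recs.foldl (fun st rec =>
          ((pvPats kmers both).foldl (pvPatStepB rec.2.toList rec.1 flank pad dedup)
            (st, PySem.Dict.empty)).1) bst =
        recs.foldl (fun st rec =>
          (pvPats kmers both).foldl (pvEmitHits rec.2.toList rec.1 flank pad dedup) st) bst := by
    intro recs
    induction recs with
    | nil => intro bst; rfl
    | cons r rs ih =>
        intro bst
        rw [List.foldl_cons, List.foldl_cons]
        rw [(pvRecordB_eq r.2.toList r.1 flank pad dedup (pvPats kmers both) bst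
              PySem.Dict.empty (pvEmptyIdxOK r.2.toList)).1]
        exact ih _
  have mainA : ∀ (recs : List (String × String))
      (bst : List (String × String) × PySem.Set String) (cache : PySem.Dict String String),
      pvCacheOK cache →
      (recs.foldl (fun st rec =>
          kmers.foldl (pvKmerStepA rec.2.toList rec.1 flank both pad dedup) st) (bst, cache)).1 =
        recs.foldl (fun st rec =>
          (pvPats kmers both).foldl (pvEmitHits rec.2.toList rec.1 flank pad dedup) st) bst := by
    intro recs
    induction recs with
    | nil => intro bst cache hc; rfl
    | cons r rs ih =>
        intro bst cache hc
        rw [List.foldl_cons, List.foldl_cons]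
        obtain ⟨h1, h2⟩ := pvRecord_eq r.2.toList r.1 flank both pad dedup kmers bst cache hc
        have heta : kmers.foldl (pvKmerStepA r.2.toList r.1 flank both pad dedup) (bst, cache) =
            ((kmers.foldl (pvKmerStepA r.2.toList r.1 flank both pad dedup) (bst, cache)).1,
             (kmers.foldl (pvKmerStepA r.2.toList r.1 flank both pad dedup) (bst, cache)).2) := rfl
        rw [heta]
        rw [ih _ _ h2, h1]
  rw [mainA circ_records ([], PySem.Set.ofList []) PySem.Dict.empty pvEmptyCacheOK]
  exact congrArg Prod.fst (mainB circ_records ([], PySem.Set.ofList [])).symm
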